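-- pv_equiv track=rewrite | github.com/smc5720/Programmers | heap3.py | solution
-- ===== SOURCE A (Python) =====
-- import heapq
--
-- def solution(operations):
--     answer = []
--     heap = []
--
--     for i in operations:
--         if i[0] == "I":
--             heapq.heappush(heap, int(i[2:]))
--         else:
--             if heap:
--                 if i[2] == "-":
--                     heapq.heappop(heap)
--                 else:
--                     heap.sort()
--                     heap.pop()
--                     heapq.heapify(heap)
--
--     if len(heap) > 0:
--         heap.sort()
--         answer.append(heap[-1])
--         answer.append(heap[0])
--     else:
--         answer.append(0)
--         answer.append(0)
--
--     return answer
-- ===== SOURCE B (Python) =====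
-- def solution(operations):
--     q = []  # ascending sorted list of current elements
--     for op in operations:
--         if op[0] == "I":
--             x = int(op[2:])
--             i = 0
--             while i < len(q) and q[i] <= x:
--                 i += 1
--             q.insert(i, x)
--         elif q:
--             if op[2] == "-":
--                 q.pop(0)
--             else:
--                 q.pop()
--     return [q[-1], q[0]] if q else [0, 0]
-- ===== Notes on version B (the rewrite author's own statement) =====
-- stated objective: simpler
-- what changed: A maintains a binary heap via hand-driven heapq calls (and re-sorts + re-heapifies the whole heap on every delete-max); B keeps the live multiset as a single ascending sorted list, inserting at the linear-scan position and popping an end for delete-min/max.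
-- outside the precondition, e.g. on solution(['I 1', 'D -1', 'D']): A returns [0, 0], B returns [0, 0]
import Mathlib
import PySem

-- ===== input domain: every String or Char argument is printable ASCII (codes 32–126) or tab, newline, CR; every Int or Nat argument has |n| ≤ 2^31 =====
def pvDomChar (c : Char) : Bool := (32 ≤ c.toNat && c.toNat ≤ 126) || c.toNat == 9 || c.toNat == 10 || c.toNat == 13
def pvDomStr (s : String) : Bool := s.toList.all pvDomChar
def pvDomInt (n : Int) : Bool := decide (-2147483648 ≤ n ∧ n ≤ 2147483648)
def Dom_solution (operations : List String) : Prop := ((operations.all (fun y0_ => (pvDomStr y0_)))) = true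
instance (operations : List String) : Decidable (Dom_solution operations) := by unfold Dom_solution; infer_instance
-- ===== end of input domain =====

-- B replaces A's heapq-based dual-ended queue by one ascending sorted list (simpler; return values agree).

-- ===== PORT A =====
-- literal port of CPython heapq._siftdown (the while-loop, recursion on pos;
-- `(pos - 1) / 2` and `heap.getD ((pos - 1) / 2) 0` are Python's locals parentpos/parent inlined)
def pvSiftdownGo (newitem : Int) (startpos : Nat) : Nat → List Int → Nat → List Int
  | 0, heap, pos => heap.set pos newitem
  | fuel + 1, heap, pos =>
    if _h : startpos < pos then
      if _h2 : newitem < heap.getD ((pos - 1) / 2) 0 then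
        pvSiftdownGo newitem startpos fuel (heap.set pos (heap.getD ((pos - 1) / 2) 0)) ((pos - 1) / 2)
      else heap.set pos newitem
    else heap.set pos newitem

def pvSiftdown (heap : List Int) (startpos pos : Nat) : List Int :=
  pvSiftdownGo (heap.getD pos 0) startpos pos heap pos

-- the `childpos` update of CPython heapq._siftup (pick the smaller child, ties -> right)
def pvChildSel (heap : List Int) (endpos pos : Nat) : Nat :=
  if 2 * pos + 2 < endpos ∧ ¬ (heap.getD (2 * pos + 1) 0 < heap.getD (2 * pos + 2) 0) then
    2 * pos + 2
  else 2 * pos + 1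

-- literal port of CPython heapq._siftup (descend to a leaf, then _siftdown back up)
def pvSiftupGo (endpos startpos : Nat) (newitem : Int) : Nat → List Int → Nat → List Int
  | 0, heap, pos => pvSiftdownGo newitem startpos pos (heap.set pos newitem) pos
  | fuel + 1, heap, pos =>
    if _h : 2 * pos + 1 < endpos then
      pvSiftupGo endpos startpos newitem fuel
        (heap.set pos (heap.getD (pvChildSel heap endpos pos) 0)) (pvChildSel heap endpos pos)
    else
      pvSiftdownGo newitem startpos pos (heap.set pos newitem) pos

def pvSiftup (heap : List Int) (pos : Nat) : List Int :=
  pvSiftupGo heap.length pos (heap.getD pos 0) heap.length heap pos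

def pvHeappush (heap : List Int) (item : Int) : List Int :=
  pvSiftdown (heap ++ [item]) 0 ((heap ++ [item]).length - 1)

def pvHeappop (heap : List Int) : List Int :=  -- popped value is discarded by A
  if heap.dropLast.isEmpty then heap.dropLast
  else pvSiftup (heap.dropLast.set 0 (heap.getD (heap.length - 1) 0)) 0

def pvHeapify (x : List Int) : List Int :=
  (List.range (x.length / 2)).reverse.foldl (fun h i => pvSiftup h i) x

def pvStepA (heap : List Int) (op : String) : List Int :=
  match PySem.Str.pyGet? op 0 with
  | none => heap        -- IndexError (op = ""), excluded by Pre_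
  | some c =>
    if c = 'I' then
      match PySem.Int.ofStr? (PySem.Str.slice op (some 2) none) with
      | none => heap    -- ValueError of int(), excluded by Pre_
      | some x => pvHeappush heap x
    else if heap.isEmpty then heap
    else
      match PySem.Str.pyGet? op 2 with
      | none => heap    -- IndexError, excluded by Pre_
      | some c2 =>
        if c2 = '-' then pvHeappop heap
        else pvHeapify ((PySem.List.sorted heap (fun v => v) false).dropLast)

def solution (operations : List String) : List Int :=
  if 0 < (operations.foldl pvStepA []).length then
    [PySem.List.pyGetD (PySem.List.sorted (operations.foldl pvStepA []) (fun v => v) false) (-1) 0,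
     PySem.List.pyGetD (PySem.List.sorted (operations.foldl pvStepA []) (fun v => v) false) 0 0]
  else [0, 0]

-- ===== PORT B =====
-- the `while i < len(q) and q[i] <= x` scan of Source B
def pvInsPos (q : List Int) (x : Int) : Nat → Nat → Nat
  | 0, i => i
  | fuel + 1, i => if i < q.length ∧ q.getD i 0 ≤ x then pvInsPos q x fuel (i + 1) else i

def pvStepB (q : List Int) (op : String) : List Int :=
  match PySem.Str.pyGet? op 0 with
  | none => q
  | some c =>
    if c = 'I' then
      match PySem.Int.ofStr? (PySem.Str.slice op (some 2) none) with
      | none => q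
      | some x => PySem.List.insert q (pvInsPos q x q.length 0) x
    else if q.isEmpty then q
    else
      match PySem.Str.pyGet? op 2 with
      | none => q
      | some c2 => if c2 = '-' then q.tail else q.dropLast

def solution_alt (operations : List String) : List Int :=
  if (operations.foldl pvStepB []).isEmpty then [0, 0]
  else [PySem.List.pyGetD (operations.foldl pvStepB []) (-1) 0,
        PySem.List.pyGetD (operations.foldl pvStepB []) 0 0]

-- ===== PRECONDITION & SPEC =====
-- Pre_ admits the ops on which A cannot raise: every op is nonempty, an insert's payload parses as
-- an int, and a non-insert op PRECEDED by some insert op is at least 3 chars long (A reads op[2]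
-- whenever the queue is nonempty; with no earlier insert the queue is certainly empty). This also
-- excludes short delete ops that in fact meet an already-drained queue, where A returns [0,0]
-- without reading op[2] — there B returns [0,0] as well (see cites).
def Pre_solution (operations : List String) : Prop :=
  (∀ op ∈ operations, op.toList ≠ [] ∧
    (op.toList.headD ' ' = 'I' →
      (PySem.Int.ofStr? (PySem.Str.slice op (some 2) none)).isSome = true)) ∧
  (∀ p : Nat, (hp : p < operations.length) →
    (operations[p]'hp).toList.headD ' ' ≠ 'I' →
    (∃ i : Nat, ∃ hi : i < p, (operations[i]'(by omega)).toList.headD ' ' = 'I') →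
    3 ≤ (operations[p]'hp).toList.length)
instance (operations : List String) : Decidable (Pre_solution operations) := by
  unfold Pre_solution; infer_instance

def pvWitness_solution : List String := ["I 5", "I 3", "D 1", "I -2", "D -1", "I 7"]

def Spec_solution (operations : List String) (out : List Int) : Prop := out = solution_alt operations
instance (operations : List String) (out : List Int) : Decidable (Spec_solution operations out) := by
  unfold Spec_solution; infer_instance

-- ===== CLAIM (what is proved, stated in full; the proofs are below) =====
def Claim_equal_solution : Prop := ∀ (operations : List String), Dom_solution operations → Pre_solution operations → Spec_solution operations (solution operations)

-- ===== LEMMAS AND PROOFS =====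

-- the binary-heap invariant maintained by A's state
def HInv (l : List Int) : Prop :=
  ∀ i : Nat, 0 < i → i < l.length → l.getD ((i - 1) / 2) 0 ≤ l.getD i 0

lemma pvGetD_eq (l : List Int) (i : Nat) (h : i < l.length) : l.getD i 0 = l[i] := by
  simp [List.getD_eq_getElem?_getD, List.getElem?_eq_getElem h]

lemma pvGetD_set_self (l : List Int) (i : Nat) (v : Int) (h : i < l.length) :
    (l.set i v).getD i 0 = v := by
  rw [pvGetD_eq _ _ (by simpa using h)]
  simp [h]

lemma pvGetD_set_ne (l : List Int) (i j : Nat) (v : Int) (h : j ≠ i) :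
    (l.set i v).getD j 0 = l.getD j 0 := by
  simp [List.getD_eq_getElem?_getD, List.getElem?_set, h.symm]

lemma pvSet_getD_self (l : List Int) (i : Nat) (h : i < l.length) :
    l.set i (l.getD i 0) = l := by
  induction l generalizing i with
  | nil => simp
  | cons a t ih =>
    cases i with
    | zero => simp
    | succ n => simpa using ih n (by simpa using h)

lemma pvSet_append_last (l : List Int) (a b : Int) :
    (l ++ [a]).set l.length b = l ++ [b] := by
  induction l with
  | nil => simp
  | cons c t ih => simpa using ih

lemma pvCons_set_perm : ∀ (t : List Int) (j : Nat) (x : Int), j < t.length →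
    (t.getD j 0 :: t.set j x).Perm (x :: t)
  | a :: t, 0, x, _ => by simpa using List.Perm.swap x a t
  | a :: t, j + 1, x, h => by
    simp only [List.getD_cons_succ, List.set_cons_succ]
    exact List.Perm.trans (List.Perm.swap a (t.getD j 0) (t.set j x))
      (List.Perm.trans (List.Perm.cons a (pvCons_set_perm t j x (by simpa using h)))
        (List.Perm.swap x a t))
  | [], j, x, h => by simp at h

lemma pvSet_set_perm : ∀ (l : List Int) (i j : Nat) (x : Int), i < l.length → j < l.length →
    i ≠ j → ((l.set i (l.getD j 0)).set j x).Perm (l.set i x)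
  | [], i, j, x, hi, _, _ => by simp at hi
  | a :: t, 0, 0, x, _, _, hne => absurd rfl hne
  | a :: t, 0, j + 1, x, hi, hj, hne => by
    simp only [List.getD_cons_succ, List.set_cons_zero, List.set_cons_succ]
    exact pvCons_set_perm t j x (by simpa using hj)
  | a :: t, i + 1, 0, x, hi, hj, hne => by
    simp only [List.getD_cons_zero, List.set_cons_succ, List.set_cons_zero]
    -- goal: x :: t.set i a ~ a :: t.set i x
    have hl : i < t.length := by simpa using hi
    have h1 := pvCons_set_perm t i a hl
    have h2 := pvCons_set_perm t i x hl
    have k1 : (t.getD i 0 :: x :: t.set i a).Perm (x :: a :: t) :=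
      (List.Perm.swap x (t.getD i 0) (t.set i a)).trans (h1.cons x)
    have k2 : (t.getD i 0 :: a :: t.set i x).Perm (x :: a :: t) := by
      refine (List.Perm.swap a (t.getD i 0) (t.set i x)).trans ?_
      exact (h2.cons a).trans (List.Perm.swap x a t)
    exact (k1.trans k2.symm).cons_inv
  | a :: t, i + 1, j + 1, x, hi, hj, hne => by
    simp only [List.getD_cons_succ, List.set_cons_succ]
    exact (pvSet_set_perm t i j x (by simpa using hi) (by simpa using hj) (by omega)).cons a

-- "j lies in the subtree rooted at s"
def pvDescB (s j : Nat) : Bool :=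
  if j ≤ s then j == s else pvDescB s ((j - 1) / 2)
termination_by j
decreasing_by omega

lemma pvDescB_le (s j : Nat) (h : pvDescB s j = true) : s ≤ j := by
  unfold pvDescB at h
  split at h
  · simp at h; omega
  · omega

lemma pvDescB_self (s : Nat) : pvDescB s s = true := by
  unfold pvDescB; simp

lemma pvDescB_step (s j : Nat) (h : s < j) : pvDescB s j = pvDescB s ((j - 1) / 2) := by
  conv_lhs => unfold pvDescB
  simp [Nat.not_le.mpr h]

lemma pvDescB_zero (j : Nat) : pvDescB 0 j = true := by
  induction j using Nat.strong_induction_on with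
  | _ j ih =>
    cases j with
    | zero => exact pvDescB_self 0
    | succ n => rw [pvDescB_step 0 (n + 1) (by omega)]; exact ih _ (by omega)

lemma pvSiftdownGo_perm (x : Int) (s fuel : Nat) (l : List Int) (pos : Nat) :
    pos < l.length → (pvSiftdownGo x s fuel l pos).Perm (l.set pos x) := by
  fun_induction pvSiftdownGo x s fuel l pos with
  | case1 l pos => intro _; exact List.Perm.refl _
  | case2 fuel l pos h hlt ih =>
    intro hl
    have hpp : (pos - 1) / 2 < l.length := by omega
    refine (ih (by simpa using hpp)).trans ?_
    exact pvSet_set_perm l pos ((pos - 1) / 2) x hl hpp (by omega)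
  | case3 => intro _; exact List.Perm.refl _
  | case4 => intro _; exact List.Perm.refl _

lemma pvExit_inv_eq (x : Int) (s : Nat) (l : List Int) (pos : Nat)
    (hps : pos = s) (hlen : pos < l.length)
    (S2 : ∀ i : Nat, 0 < i → i < l.length → i ≠ pos → (i - 1) / 2 ≠ pos →
      l.getD ((i - 1) / 2) 0 ≤ l.getD i 0)
    (S3 : ∀ i : Nat, 0 < i → i < l.length → (i - 1) / 2 = pos → x ≤ l.getD i 0)
    (S5 : 0 < s → l.getD ((s - 1) / 2) 0 ≤ x) :
    HInv (l.set pos x) := by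
  intro i hi hil
  have hil' : i < l.length := by simpa using hil
  by_cases hip : i = pos
  · subst hip
    rw [pvGetD_set_ne l i _ x (by omega), pvGetD_set_self l i x hlen]
    subst hps
    exact S5 hi
  · by_cases hpp2 : (i - 1) / 2 = pos
    · rw [hpp2, pvGetD_set_self l pos x hlen, pvGetD_set_ne l pos i x hip]
      exact S3 i hi hil' hpp2
    · rw [pvGetD_set_ne l pos i x hip, pvGetD_set_ne l pos _ x hpp2]
      exact S2 i hi hil' hip hpp2

lemma pvExit_inv_lt (x : Int) (s : Nat) (l : List Int) (pos : Nat)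
    (hlt : ¬ x < l.getD ((pos - 1) / 2) 0) (hs : s < pos) (hlen : pos < l.length)
    (S2 : ∀ i : Nat, 0 < i → i < l.length → i ≠ pos → (i - 1) / 2 ≠ pos →
      l.getD ((i - 1) / 2) 0 ≤ l.getD i 0)
    (S3 : ∀ i : Nat, 0 < i → i < l.length → (i - 1) / 2 = pos → x ≤ l.getD i 0) :
    HInv (l.set pos x) := by
  intro i hi hil
  have hil' : i < l.length := by simpa using hil
  by_cases hip : i = pos
  · subst hip
    rw [pvGetD_set_ne l i _ x (by omega), pvGetD_set_self l i x hlen]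
    exact not_lt.mp hlt
  · by_cases hpp2 : (i - 1) / 2 = pos
    · rw [hpp2, pvGetD_set_self l pos x hlen, pvGetD_set_ne l pos i x hip]
      exact S3 i hi hil' hpp2
    · rw [pvGetD_set_ne l pos i x hip, pvGetD_set_ne l pos _ x hpp2]
      exact S2 i hi hil' hip hpp2

lemma pvSiftdownGo_inv (x : Int) (s fuel : Nat) (l : List Int) (pos : Nat) :
    pos ≤ fuel → s ≤ pos → pos < l.length → pvDescB s pos = true →
    (∀ i : Nat, 0 < i → i < l.length → i ≠ pos → (i - 1) / 2 ≠ pos →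
      l.getD ((i - 1) / 2) 0 ≤ l.getD i 0) →
    (∀ i : Nat, 0 < i → i < l.length → (i - 1) / 2 = pos → x ≤ l.getD i 0) →
    (s < pos → ∀ i : Nat, 0 < i → i < l.length → (i - 1) / 2 = pos →
      l.getD ((pos - 1) / 2) 0 ≤ l.getD i 0) →
    (0 < s → l.getD ((s - 1) / 2) 0 ≤ x) →
    HInv (pvSiftdownGo x s fuel l pos) := by
  fun_induction pvSiftdownGo x s fuel l pos with
  | case1 l pos =>
    intro hfuel hsle hlen hdesc S2 S3 S4 S5
    exact pvExit_inv_eq x s l pos (by omega) hlen S2 S3 S5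
  | case2 fuel l pos h hlt ih =>
    intro hfuel hsle hlen hdesc S2 S3 S4 S5
    have hpp : (pos - 1) / 2 < pos := by omega
    have hppl : (pos - 1) / 2 < l.length := by omega
    have hdesc' : pvDescB s ((pos - 1) / 2) = true := by
      rw [← pvDescB_step s pos h]; exact hdesc
    have hspp : s ≤ (pos - 1) / 2 := pvDescB_le s _ hdesc'
    apply ih (by omega) hspp (by simpa using hppl) hdesc'
    · -- S2'
      intro i hi hil hine hipne
      have hil' : i < l.length := by simpa using hil
      by_cases hipos : i = pos
      · subst hipos
        exact absurd rfl hipne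
      · by_cases hppos : (i - 1) / 2 = pos
        · rw [pvGetD_set_ne l pos i _ hipos, hppos, pvGetD_set_self l pos _ hlen]
          exact S4 h i hi hil' hppos
        · rw [pvGetD_set_ne l pos i _ hipos, pvGetD_set_ne l pos _ _ hppos]
          exact S2 i hi hil' hipos hppos
    · -- S3'
      intro i hi hil hip
      have hil' : i < l.length := by simpa using hil
      by_cases hipos : i = pos
      · subst hipos; rw [pvGetD_set_self l i _ hil']; exact le_of_lt hlt
      · rw [pvGetD_set_ne l pos i _ hipos]
        have h2 := S2 i hi hil' hipos (by omega)
        rw [hip] at h2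
        exact le_trans (le_of_lt hlt) h2
    · -- S4'
      intro hspp' i hi hil hip
      have hil' : i < l.length := by simpa using hil
      have hgp : ((pos - 1) / 2 - 1) / 2 ≠ pos := by omega
      have hppne : (pos - 1) / 2 ≠ pos := by omega
      have hpp0 : 0 < (pos - 1) / 2 := by omega
      have hgple : l.getD (((pos - 1) / 2 - 1) / 2) 0 ≤ l.getD ((pos - 1) / 2) 0 :=
        S2 _ hpp0 hppl hppne (by omega)
      rw [pvGetD_set_ne l pos _ _ hgp]
      by_cases hipos : i = pos
      · subst hipos; rw [pvGetD_set_self l i _ hlen]; exact hgple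
      · rw [pvGetD_set_ne l pos i _ hipos]
        have h2 := S2 i hi hil' hipos (by omega)
        rw [hip] at h2
        exact le_trans hgple h2
    · -- S5'
      intro hs
      rw [pvGetD_set_ne l pos _ _ (by omega)]
      exact S5 hs
  | case3 fuel l pos h hlt =>
    intro hfuel hsle hlen hdesc S2 S3 S4 S5
    exact pvExit_inv_lt x s l pos hlt h hlen S2 S3
  | case4 fuel l pos h =>
    intro hfuel hsle hlen hdesc S2 S3 S4 S5
    exact pvExit_inv_eq x s l pos (by omega) hlen S2 S3 S5

lemma pvChildSel_spec (heap : List Int) (endpos pos : Nat) (hlen : endpos = heap.length)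
    (h : 2 * pos + 1 < endpos) :
    pos < pvChildSel heap endpos pos ∧ pvChildSel heap endpos pos < heap.length ∧
    (pvChildSel heap endpos pos - 1) / 2 = pos ∧
    ∀ i : Nat, 0 < i → i < heap.length → (i - 1) / 2 = pos →
      heap.getD (pvChildSel heap endpos pos) 0 ≤ heap.getD i 0 := by
  subst hlen
  by_cases hcond : 2 * pos + 2 < heap.length ∧
      ¬ (heap.getD (2 * pos + 1) 0 < heap.getD (2 * pos + 2) 0)
  · unfold pvChildSel
    rw [if_pos hcond]
    refine ⟨by omega, hcond.1, by omega, ?_⟩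
    intro i hi0 hil hip
    have hi12 : i = 2 * pos + 1 ∨ i = 2 * pos + 2 := by omega
    rcases hi12 with rfl | rfl
    · exact not_lt.mp hcond.2
    · exact le_refl _
  · unfold pvChildSel
    rw [if_neg hcond]
    refine ⟨by omega, by omega, by omega, ?_⟩
    intro i hi0 hil hip
    have hi12 : i = 2 * pos + 1 ∨ i = 2 * pos + 2 := by omega
    push_neg at hcond
    rcases hi12 with rfl | rfl
    · exact le_refl _
    · exact le_of_lt (hcond (by omega))

lemma pvSiftupGo_exit (endpos s : Nat) (x : Int) (heap : List Int) (pos : Nat)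
    (hsle : s ≤ pos) (hlen : pos < heap.length) (hdesc : pvDescB s pos = true)
    (hend : endpos = heap.length) (hleaf : ¬ 2 * pos + 1 < endpos)
    (U2 : ∀ i : Nat, 0 < i → i < heap.length → (i - 1) / 2 ≠ pos →
      heap.getD ((i - 1) / 2) 0 ≤ heap.getD i 0)
    (U5 : 0 < s → heap.getD ((s - 1) / 2) 0 ≤ x) :
    HInv (pvSiftdownGo x s pos (heap.set pos x) pos) ∧
      (pvSiftdownGo x s pos (heap.set pos x) pos).Perm (heap.set pos x) := by
  constructor
  · apply pvSiftdownGo_inv x s pos (heap.set pos x) pos (le_refl _) hsle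
      (by simpa using hlen) hdesc
    · intro i hi hil hine hipne
      have hil' : i < heap.length := by simpa using hil
      rw [pvGetD_set_ne heap pos i x hine, pvGetD_set_ne heap pos _ x hipne]
      exact U2 i hi hil' hipne
    · intro i hi hil hip
      have hil' : i < heap.length := by simpa using hil
      omega
    · intro _ i hi hil hip
      have hil' : i < heap.length := by simpa using hil
      omega
    · intro hs
      rw [pvGetD_set_ne heap pos _ x (by omega)]
      exact U5 hs
  · have hp := pvSiftdownGo_perm x s pos (heap.set pos x) pos (by simpa using hlen)
    rwa [List.set_set] at hp

lemma pvSiftupGo_spec (endpos s : Nat) (x : Int) (fuel : Nat) (heap : List Int) (pos : Nat) :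
    endpos ≤ fuel + pos → endpos = heap.length → s ≤ pos → pos < heap.length →
    pvDescB s pos = true →
    (∀ i : Nat, 0 < i → i < heap.length → (i - 1) / 2 ≠ pos →
      heap.getD ((i - 1) / 2) 0 ≤ heap.getD i 0) →
    (0 < pos → ∀ i : Nat, i < heap.length → (i - 1) / 2 = pos →
      heap.getD ((pos - 1) / 2) 0 ≤ heap.getD i 0) →
    (0 < s → heap.getD ((s - 1) / 2) 0 ≤ x) →
    HInv (pvSiftupGo endpos s x fuel heap pos) ∧
      (pvSiftupGo endpos s x fuel heap pos).Perm (heap.set pos x) := by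
  fun_induction pvSiftupGo endpos s x fuel heap pos with
  | case1 heap pos =>
    intro hfuel hend hsle hlen hdesc U2 U3 U5
    exact pvSiftupGo_exit endpos s x heap pos hsle hlen hdesc hend (by omega) U2 U5
  | case2 fuel heap pos h ih =>
    intro hfuel hend hsle hlen hdesc U2 U3 U5
    obtain ⟨hcgt, hclen, hcpar, hmin⟩ := pvChildSel_spec heap endpos pos hend h
    set c := pvChildSel heap endpos pos with hcdef
    have hdesc' : pvDescB s c = true := by
      rw [pvDescB_step s c (by omega), hcpar]; exact hdesc
    obtain ⟨hInv, hPerm⟩ := ih (by omega) (by simpa using hend) (by omega)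
      (by simpa using hclen) hdesc'
      (by -- U2'
        intro i hi hil hne
        have hil' : i < heap.length := by simpa using hil
        by_cases hipos : i = pos
        · subst hipos
          rw [pvGetD_set_self heap i _ hlen, pvGetD_set_ne heap i _ _ (by omega)]
          exact U3 hi c hclen hcpar
        · by_cases hppos : (i - 1) / 2 = pos
          · by_cases hic : i = c
            · rw [hppos, pvGetD_set_self heap pos _ hlen, hic,
                pvGetD_set_ne heap pos c _ (by omega)]
            · rw [hppos, pvGetD_set_self heap pos _ hlen, pvGetD_set_ne heap pos i _ hipos]
              exact hmin i hi hil' hppos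
          · rw [pvGetD_set_ne heap pos i _ hipos, pvGetD_set_ne heap pos _ _ hppos]
            exact U2 i hi hil' hppos)
      (by -- U3'
        intro _ i hil hip
        have hil' : i < heap.length := by simpa using hil
        have hi1 : 0 < i := by omega
        have hine : i ≠ pos := by omega
        rw [hcpar, pvGetD_set_self heap pos _ hlen, pvGetD_set_ne heap pos i _ hine]
        have h2 := U2 i hi1 hil' (by omega)
        rw [hip] at h2
        exact h2)
      (by -- U5'
        intro hs
        rw [pvGetD_set_ne heap pos _ _ (by omega)]
        exact U5 hs)
    refine ⟨hInv, hPerm.trans ?_⟩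
    exact pvSet_set_perm heap pos c x hlen hclen (by omega)
  | case3 fuel heap pos h =>
    intro hfuel hend hsle hlen hdesc U2 U3 U5
    exact pvSiftupGo_exit endpos s x heap pos hsle hlen hdesc hend h U2 U5

lemma pvHInv_nil : HInv [] := by intro i _ h; simp at h

lemma pvRoot_min (l : List Int) (h : HInv l) : ∀ i : Nat, i < l.length → l.getD 0 0 ≤ l.getD i 0 := by
  intro i
  induction i using Nat.strong_induction_on with
  | _ i ih =>
    intro hil
    rcases Nat.eq_zero_or_pos i with h0 | h0
    · subst h0; exact le_refl _
    · exact le_trans (ih ((i - 1) / 2) (by omega) (by omega)) (h i h0 hil)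

lemma pvRoot_min_mem (l : List Int) (h : HInv l) : ∀ y ∈ l, l.getD 0 0 ≤ y := by
  intro y hy
  obtain ⟨i, hil, rfl⟩ := List.mem_iff_getElem.mp hy
  rw [← pvGetD_eq l i hil]
  exact pvRoot_min l h i hil

lemma pvHeappush_spec (l : List Int) (x : Int) (h : HInv l) :
    HInv (pvHeappush l x) ∧ (pvHeappush l x).Perm (x :: l) := by
  unfold pvHeappush pvSiftdown
  have hlen : (l ++ [x]).length - 1 = l.length := by simp
  rw [hlen]
  have hget : (l ++ [x]).getD l.length 0 = x := by
    rw [pvGetD_eq _ _ (by simp)]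
    simp
  rw [hget]
  constructor
  · apply pvSiftdownGo_inv x 0 l.length (l ++ [x]) l.length (le_refl _) (Nat.zero_le _)
      (by simp) (pvDescB_zero _)
    · intro i hi hil hine _
      have hil' : i < l.length := by simp at hil; omega
      have hp : (i - 1) / 2 < l.length := by omega
      rw [pvGetD_eq _ _ (by simp; omega), pvGetD_eq _ _ (by simp; omega),
        List.getElem_append_left hil', List.getElem_append_left hp,
        ← pvGetD_eq _ _ hil', ← pvGetD_eq _ _ hp]
      exact h i hi hil'
    · intro i hi hil hip
      simp at hil
      omega
    · intro _ i hi hil hip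
      simp at hil
      omega
    · intro hs; omega
  · have hp := pvSiftdownGo_perm x 0 l.length (l ++ [x]) l.length (by simp)
    rw [pvSet_append_last] at hp
    exact hp.trans (by simpa using List.perm_append_comm (l₁ := l) (l₂ := [x]))

lemma pvGetD_dropLast (l : List Int) (j : Nat) (h : j < l.length - 1) :
    l.dropLast.getD j 0 = l.getD j 0 := by
  rw [pvGetD_eq _ _ (by simpa using h), pvGetD_eq _ _ (by omega)]
  simp [List.getElem_dropLast]

lemma pvHeappop_spec (l : List Int) (h : HInv l) (hne : l ≠ []) :
    HInv (pvHeappop l) ∧ (l.getD 0 0 :: pvHeappop l).Perm l := by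
  unfold pvHeappop
  have hlpos : 0 < l.length := List.length_pos_of_ne_nil hne
  by_cases h1 : l.length = 1
  · obtain ⟨a, rfl⟩ := List.length_eq_one_iff.mp h1
    simpa using pvHInv_nil
  · have hlen2 : 2 ≤ l.length := by omega
    have hdne : l.dropLast ≠ [] := by
      intro hc
      have := congrArg List.length hc
      simp at this
      omega
    have hrest : l.dropLast.isEmpty = false := by
      rw [Bool.eq_false_iff]
      simpa [List.isEmpty_iff] using hdne
    rw [hrest]
    simp only [Bool.false_eq_true, if_false]
    have hdll : l.dropLast.length = l.length - 1 := by simp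
    have hsetlen : 0 < (l.dropLast.set 0 (l.getD (l.length - 1) 0)).length := by
      simp; omega
    unfold pvSiftup
    obtain ⟨hInv, hPerm⟩ := pvSiftupGo_spec
      (l.dropLast.set 0 (l.getD (l.length - 1) 0)).length 0
      ((l.dropLast.set 0 (l.getD (l.length - 1) 0)).getD 0 0)
      (l.dropLast.set 0 (l.getD (l.length - 1) 0)).length
      (l.dropLast.set 0 (l.getD (l.length - 1) 0)) 0 (by omega) rfl (le_refl 0)
      hsetlen (pvDescB_self 0)
      (by
        intro i hi hil hne2
        have hil' : i < l.length - 1 := by simp at hil; omega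
        have hp0 : 0 < (i - 1) / 2 := by omega
        have hpl : (i - 1) / 2 < l.length - 1 := by omega
        rw [pvGetD_set_ne _ _ _ _ (by omega), pvGetD_set_ne _ _ _ _ (by omega),
          pvGetD_dropLast _ _ hil', pvGetD_dropLast _ _ hpl]
        exact h i hi (by omega))
      (by intro hc; omega)
      (by intro hc; omega)
    rw [pvSet_getD_self _ 0 hsetlen] at hPerm
    refine ⟨hInv, ?_⟩
    refine (hPerm.cons _).trans ?_
    have hd0 : l.dropLast.getD 0 0 = l.getD 0 0 := pvGetD_dropLast l 0 (by omega)
    have hc := pvCons_set_perm l.dropLast 0 (l.getD (l.length - 1) 0) (by simp; omega)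
    rw [hd0] at hc
    refine hc.trans ?_
    have hrl : l.dropLast ++ [l.getD (l.length - 1) 0] = l := by
      rw [pvGetD_eq _ _ (by omega), ← List.getLast_eq_getElem hne]
      exact List.dropLast_append_getLast hne
    rw [← hrl]
    simpa using List.perm_append_comm (l₁ := [l.getD (l.length - 1) 0]) (l₂ := l.dropLast)

lemma pvSiftup_keep (l : List Int) (pos : Nat) (h : HInv l) (hp : pos < l.length) :
    HInv (pvSiftup l pos) ∧ (pvSiftup l pos).Perm l := by
  unfold pvSiftup
  obtain ⟨hInv, hPerm⟩ := pvSiftupGo_spec l.length pos (l.getD pos 0) l.length l pos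
    (by omega) rfl (le_refl _) hp (pvDescB_self pos)
    (by intro i hi hil _; exact h i hi hil)
    (by
      intro hpos i hil hip
      have hi1 : 0 < i := by omega
      exact le_trans (h pos hpos hp) (by have := h i hi1 hil; rwa [hip] at this))
    (by intro hpos; exact h pos hpos hp)
  rw [pvSet_getD_self l pos hp] at hPerm
  exact ⟨hInv, hPerm⟩

lemma pvFoldl_siftup_spec : ∀ (idxs : List Nat) (l : List Int), HInv l →
    (∀ i ∈ idxs, i < l.length) →
    HInv (idxs.foldl (fun h i => pvSiftup h i) l) ∧
      (idxs.foldl (fun h i => pvSiftup h i) l).Perm l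
  | [], l, h, _ => ⟨h, List.Perm.refl _⟩
  | i :: t, l, h, hb => by
    simp only [List.foldl_cons]
    obtain ⟨h1, h2⟩ := pvSiftup_keep l i h (hb i (by simp))
    obtain ⟨h3, h4⟩ := pvFoldl_siftup_spec t (pvSiftup l i) h1
      (by intro j hj; rw [h2.length_eq]; exact hb j (by simp [hj]))
    exact ⟨h3, h4.trans h2⟩

lemma pvHeapify_spec (l : List Int) (h : HInv l) :
    HInv (pvHeapify l) ∧ (pvHeapify l).Perm l := by
  unfold pvHeapify
  apply pvFoldl_siftup_spec _ l h
  intro i hi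
  simp only [List.mem_reverse, List.mem_range] at hi
  omega

lemma pvPairwise_HInv (l : List Int) (h : l.Pairwise (· ≤ ·)) : HInv l := by
  intro i hi hil
  rw [pvGetD_eq _ _ (by omega), pvGetD_eq _ _ hil]
  exact List.pairwise_iff_getElem.mp h _ _ (by omega) hil (by omega)

lemma pvGetD_mono (q : List Int) (hs : q.Pairwise (· ≤ ·)) (a b : Nat) (hab : a ≤ b)
    (hb : b < q.length) : q.getD a 0 ≤ q.getD b 0 := by
  rcases Nat.eq_or_lt_of_le hab with rfl | hlt
  · exact le_refl _
  · rw [pvGetD_eq _ _ (by omega), pvGetD_eq _ _ hb]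
    exact List.pairwise_iff_getElem.mp hs a b (by omega) hb hlt

-- B-side: correctness of the linear insertion
lemma pvInsPos_spec (q : List Int) (x : Int) : ∀ (fuel i : Nat), i ≤ q.length →
    q.length ≤ i + fuel →
    i ≤ pvInsPos q x fuel i ∧ pvInsPos q x fuel i ≤ q.length ∧
    (∀ k : Nat, i ≤ k → k < pvInsPos q x fuel i → q.getD k 0 ≤ x) ∧
    (pvInsPos q x fuel i < q.length → x < q.getD (pvInsPos q x fuel i) 0) := by
  intro fuel i
  fun_induction pvInsPos q x fuel i with
  | case1 i =>
    intro hle hfuel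
    refine ⟨le_refl _, hle, by omega, ?_⟩
    intro hlt
    omega
  | case2 fuel i h ih =>
    intro hle hfuel
    obtain ⟨ih1, ih2, ih3, ih4⟩ := ih (by omega) (by omega)
    refine ⟨by omega, ih2, ?_, ih4⟩
    intro k hk1 hk2
    rcases Nat.eq_or_lt_of_le hk1 with rfl | hk
    · exact h.2
    · exact ih3 k hk hk2
  | case3 fuel i h =>
    intro hle hfuel
    refine ⟨le_refl _, hle, by omega, ?_⟩
    intro hlt
    have hnle : ¬ (q.getD i 0 ≤ x) := fun hle2 => h ⟨hlt, hle2⟩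
    exact not_le.mp hnle

lemma pvInsert_natCast (xs : List Int) (j : Nat) (v : Int) (hj : j ≤ xs.length) :
    PySem.List.insert xs (j : Int) v = xs.take j ++ v :: xs.drop j := by
  have hnn : ¬ ((j : Int) < 0) := Int.not_lt.mpr (Int.natCast_nonneg j)
  have hmin : (min (j : Int) (xs.length : Int)).toNat = j := by omega
  simp [PySem.List.insert, PySem.List.sliceIndices, hnn, hmin]

lemma pvInsert_sorted_perm (q : List Int) (x : Int) (hs : q.Pairwise (· ≤ ·)) :
    (PySem.List.insert q (pvInsPos q x q.length 0) x).Pairwise (· ≤ ·) ∧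
      (PySem.List.insert q (pvInsPos q x q.length 0) x).Perm (x :: q) := by
  obtain ⟨-, hj2, hj3, hj4⟩ := pvInsPos_spec q x q.length 0 (Nat.zero_le _) (by omega)
  set j := pvInsPos q x q.length 0 with hjdef
  rw [pvInsert_natCast q j x hj2]
  have hdropmem : ∀ b ∈ q.drop j, x ≤ b := by
    intro b hb
    obtain ⟨m, hm, rfl⟩ := List.mem_iff_getElem.mp hb
    have hmq : j + m < q.length := by simp at hm; omega
    rw [List.getElem_drop, ← pvGetD_eq q (j + m) hmq]
    exact le_trans (hj4 (by omega)).le (pvGetD_mono q hs j (j + m) (by omega) hmq)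
  have htakemem : ∀ a ∈ q.take j, a ≤ x := by
    intro a ha
    obtain ⟨k, hk, rfl⟩ := List.mem_iff_getElem.mp ha
    have hkj : k < j := by simp at hk; omega
    have hkq : k < q.length := by omega
    rw [List.getElem_take, ← pvGetD_eq q k hkq]
    exact hj3 k (Nat.zero_le _) hkj
  constructor
  · rw [List.pairwise_append]
    refine ⟨hs.sublist (List.take_sublist j q), ?_, ?_⟩
    · rw [List.pairwise_cons]
      exact ⟨hdropmem, hs.sublist (List.drop_sublist j q)⟩
    · intro a ha b hb
      rcases List.mem_cons.mp hb with rfl | hbd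
      · exact htakemem a ha
      · exact le_trans (htakemem a ha) (hdropmem b hbd)
  · calc (q.take j ++ x :: q.drop j).Perm (x :: (q.take j ++ q.drop j)) := List.perm_middle
    _ = x :: q := by rw [List.take_append_drop]

-- the per-operation condition of Pre_solution
def pvPreOp (op : String) : Prop :=
  op.toList ≠ [] ∧
    (op.toList.headD ' ' = 'I' →
      (PySem.Int.ofStr? (PySem.Str.slice op (some 2) none)).isSome = true) ∧
    (op.toList.headD ' ' ≠ 'I' → 3 ≤ op.toList.length)

lemma pvStep_sim (heap q : List Int) (op : String) (hperm : heap.Perm q) (hinv : HInv heap)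
    (hsort : q.Pairwise (· ≤ ·)) (hop : pvPreOp op) :
    (pvStepA heap op).Perm (pvStepB q op) ∧ HInv (pvStepA heap op) ∧
      (pvStepB q op).Pairwise (· ≤ ·) := by
  obtain ⟨hne, hI, hD⟩ := hop
  obtain ⟨c, cs, hl⟩ : ∃ c cs, op.toList = c :: cs := by
    cases h : op.toList with
    | nil => exact absurd h hne
    | cons a t => exact ⟨a, t, rfl⟩
  have h0 : PySem.Str.pyGet? op 0 = some c := by
    simp [pysem, hl]
  unfold pvStepA pvStepB
  rw [h0]
  have hhead : op.toList.headD ' ' = c := by rw [hl]; rfl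
  by_cases hc : c = 'I'
  · obtain ⟨x, hx⟩ := Option.isSome_iff_exists.mp (hI (hhead.trans hc))
    simp only [hc, if_true, hx]
    obtain ⟨hA1, hA2⟩ := pvHeappush_spec heap x hinv
    obtain ⟨hB1, hB2⟩ := pvInsert_sorted_perm q x hsort
    exact ⟨hA2.trans ((hperm.cons x).trans hB2.symm), hA1, hB1⟩
  · simp only [hc, if_false]
    by_cases hq : q = []
    · have hh : heap = [] := by
        subst hq
        exact hperm.eq_nil
      subst hq
      simp [hh, pvHInv_nil]
    · have hhne : heap ≠ [] := by
        intro hcon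
        exact hq ((hcon ▸ hperm).symm.eq_nil)
      have hqe : q.isEmpty = false := by
        rw [Bool.eq_false_iff]
        simpa [List.isEmpty_iff] using hq
      have hhe : heap.isEmpty = false := by
        rw [Bool.eq_false_iff]
        simpa [List.isEmpty_iff] using hhne
      rw [hqe, hhe]
      simp only [Bool.false_eq_true, if_false]
      have hlen3 : 3 ≤ op.toList.length := hD (by rw [hhead]; exact hc)
      have h2 : PySem.Str.pyGet? op 2 = some op.toList[2] := by
        have hb : PySem.Str.pyGet? op 2 = PySem.List.pyGet? op.toList 2 := by simp [pysem]
        rw [hb]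
        exact PySem.List.pyGet?_ofNat op.toList 2 (by omega)
      rw [h2]
      by_cases hc2 : op.toList[2] = '-'
      · simp only [hc2, if_true]
        obtain ⟨q0, qt, rfl⟩ : ∃ q0 qt, q = q0 :: qt := by
          cases q with
          | nil => exact absurd rfl hq
          | cons a t => exact ⟨a, t, rfl⟩
        obtain ⟨hA1, hA2⟩ := pvHeappop_spec heap hinv hhne
        have hroot : heap.getD 0 0 = q0 := by
          apply le_antisymm
          · exact pvRoot_min_mem heap hinv q0 (hperm.mem_iff.mpr (by simp))
          · have hmem : heap.getD 0 0 ∈ heap := by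
              rw [pvGetD_eq _ _ (List.length_pos_of_ne_nil hhne)]
              exact List.getElem_mem _
            have hmemq : heap.getD 0 0 ∈ q0 :: qt := hperm.mem_iff.mp hmem
            rcases List.mem_cons.mp hmemq with hh | hh
            · exact le_of_eq hh.symm
            · exact (List.pairwise_cons.mp hsort).1 _ hh
        have hfin : (heap.getD 0 0 :: pvHeappop heap).Perm (q0 :: qt) := hA2.trans hperm
        rw [hroot] at hfin
        exact ⟨hfin.cons_inv, hA1, (List.pairwise_cons.mp hsort).2⟩
      · simp only [hc2, if_false]
        have hsq : PySem.List.sorted heap (fun v => v) false = q :=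
          PySem.List.sorted_id_eq_of_perm_of_pairwise heap q hperm.symm hsort
        rw [hsq]
        have hdrop : (q.dropLast).Pairwise (· ≤ ·) := hsort.sublist (List.dropLast_sublist q)
        obtain ⟨hA1, hA2⟩ := pvHeapify_spec q.dropLast (pvPairwise_HInv _ hdrop)
        exact ⟨hA2, hA1, hdrop⟩

lemma pvStepA_nil (op : String) (hne : op.toList ≠ []) (hni : op.toList.headD ' ' ≠ 'I') :
    pvStepA [] op = [] := by
  obtain ⟨c, cs, hl⟩ : ∃ c cs, op.toList = c :: cs := by
    cases h : op.toList with
    | nil => exact absurd h hne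
    | cons a t => exact ⟨a, t, rfl⟩
  have h0 : PySem.Str.pyGet? op 0 = some c := by simp [pysem, hl]
  have hc : c ≠ 'I' := by rw [hl] at hni; simpa using hni
  unfold pvStepA
  rw [h0]
  simp [hc]

lemma pvStepB_nil (op : String) (hne : op.toList ≠ []) (hni : op.toList.headD ' ' ≠ 'I') :
    pvStepB [] op = [] := by
  obtain ⟨c, cs, hl⟩ : ∃ c cs, op.toList = c :: cs := by
    cases h : op.toList with
    | nil => exact absurd h hne
    | cons a t => exact ⟨a, t, rfl⟩
  have h0 : PySem.Str.pyGet? op 0 = some c := by simp [pysem, hl]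
  have hc : c ≠ 'I' := by rw [hl] at hni; simpa using hni
  unfold pvStepB
  rw [h0]
  simp [hc]

lemma pvFold_sim : ∀ (ops : List String) (heap q : List Int) (seen : Bool),
    heap.Perm q → HInv heap → q.Pairwise (· ≤ ·) →
    (seen = false → heap = []) →
    (∀ op ∈ ops, op.toList ≠ [] ∧
      (op.toList.headD ' ' = 'I' →
        (PySem.Int.ofStr? (PySem.Str.slice op (some 2) none)).isSome = true)) →
    (∀ p : Nat, (hp : p < ops.length) →
      (ops[p]'hp).toList.headD ' ' ≠ 'I' →
      (seen = true ∨ ∃ i : Nat, ∃ hi : i < p, (ops[i]'(by omega)).toList.headD ' ' = 'I') →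
      3 ≤ (ops[p]'hp).toList.length) →
    (ops.foldl pvStepA heap).Perm (ops.foldl pvStepB q) ∧ HInv (ops.foldl pvStepA heap) ∧
      (ops.foldl pvStepB q).Pairwise (· ≤ ·)
  | [], heap, q, seen, hperm, hinv, hsort, _, _, _ => ⟨hperm, hinv, hsort⟩
  | op :: t, heap, q, seen, hperm, hinv, hsort, hseen, hops, hdel => by
    simp only [List.foldl_cons]
    obtain ⟨hne, hI⟩ := hops op (by simp)
    by_cases hhi : op.toList.headD ' ' = 'I'
    · obtain ⟨h1, h2, h3⟩ := pvStep_sim heap q op hperm hinv hsort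
        ⟨hne, hI, fun hni => absurd hhi hni⟩
      refine pvFold_sim t _ _ true h1 h2 h3 (by intro hc; simp at hc) ?_ ?_
      · intro o ho; exact hops o (by simp [ho])
      · intro p hp hnp _
        refine hdel (p + 1) (by simpa using Nat.succ_lt_succ hp) (by simpa using hnp) ?_
        exact Or.inr ⟨0, by omega, by simpa using hhi⟩
    · by_cases hq : q = []
      · have hh : heap = [] := by subst hq; exact hperm.eq_nil
        rw [hq, hh, pvStepA_nil op hne hhi, pvStepB_nil op hne hhi]
        refine pvFold_sim t [] [] seen (List.Perm.refl _) pvHInv_nil List.Pairwise.nil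
          (fun _ => rfl) ?_ ?_
        · intro o ho; exact hops o (by simp [ho])
        · intro p hp hnp hj
          refine hdel (p + 1) (by simpa using Nat.succ_lt_succ hp) (by simpa using hnp) ?_
          rcases hj with hs | ⟨i, hi, hI2⟩
          · exact Or.inl hs
          · exact Or.inr ⟨i + 1, by omega, by simpa using hI2⟩
      · have hseen' : seen = true := by
          by_contra hc
          have hf : seen = false := by cases seen <;> simp_all
          have hh0 : heap = [] := hseen hf
          rw [hh0] at hperm
          exact hq hperm.symm.eq_nil
        have h3len : 3 ≤ op.toList.length :=
          hdel 0 (by simp) (by simpa using hhi) (Or.inl hseen')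
        obtain ⟨h1, h2, h3⟩ := pvStep_sim heap q op hperm hinv hsort
          ⟨hne, hI, fun _ => h3len⟩
        refine pvFold_sim t _ _ true h1 h2 h3 (by intro hc; simp at hc) ?_ ?_
        · intro o ho; exact hops o (by simp [ho])
        · intro p hp hnp hj
          refine hdel (p + 1) (by simpa using Nat.succ_lt_succ hp) (by simpa using hnp) ?_
          exact Or.inl hseen'

-- ===== VERDICT (by name: the statement is the Claim_ definition above) =====
theorem solution_spec : Claim_equal_solution := by
  unfold Claim_equal_solution
  intro ops hdom hpre
  unfold Spec_solution solution solution_alt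
  obtain ⟨hperm, hinv, hsort⟩ := pvFold_sim ops [] [] false (List.Perm.refl _) pvHInv_nil
    List.Pairwise.nil (fun _ => rfl) hpre.1
    (by
      intro p hp hnp hj
      rcases hj with hs | hex
      · simp at hs
      · exact hpre.2 p hp hnp hex)
  by_cases hq : ops.foldl pvStepB [] = []
  · have hh : ops.foldl pvStepA [] = [] := by
      rw [hq] at hperm
      exact hperm.eq_nil
    rw [hh, hq]
    simp
  · have hhne : ops.foldl pvStepA [] ≠ [] := by
      intro hcon
      rw [hcon] at hperm
      exact hq hperm.symm.eq_nil
    have hqe : (ops.foldl pvStepB []).isEmpty = false := by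
      rw [Bool.eq_false_iff]
      simpa [List.isEmpty_iff] using hq
    have hlen : 0 < (ops.foldl pvStepA []).length := List.length_pos_of_ne_nil hhne
    have hsq : PySem.List.sorted (ops.foldl pvStepA []) (fun v => v) false = ops.foldl pvStepB [] :=
      PySem.List.sorted_id_eq_of_perm_of_pairwise _ _ hperm.symm hsort
    rw [if_pos hlen, hqe, if_neg (by simp), hsq]
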